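-- pv_equiv track=rewrite | github.com/mpvqc/mpvQC | mpvqc/utility/resizer.py | calculate_vertical_layout_sizes
-- ===== SOURCE A (Python) =====
-- def calculate_vertical_layout_sizes(
--     video_width: int,
--     video_height: int,
--     header_height: int,
--     border_size: int,
--     handle_height: int,
--     table_height: int,
--     available_height: int,
-- ) -> tuple[int, int, int, int]:
--     height_without_table = 2 * border_size + header_height + video_height + handle_height
--
--     new_table_height = table_height
--     while height_without_table + new_table_height > available_height:
--         new_table_height -= 5
--
--     window_width = video_width + 2 * border_size
--     window_height = height_without_table + new_table_height
--     table_width = video_width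
--
--     return window_width, window_height, table_width, new_table_height
-- ===== SOURCE B (Python) =====
-- def calculate_vertical_layout_sizes(
--     video_width: int,
--     video_height: int,
--     header_height: int,
--     border_size: int,
--     handle_height: int,
--     table_height: int,
--     available_height: int,
-- ) -> tuple[int, int, int, int]:
--     height_without_table = 2 * border_size + header_height + video_height + handle_height
--     excess = height_without_table + table_height - available_height
--     steps = max(0, -(-excess // 5))  # ceil(excess / 5), at least 0
--     new_table_height = table_height - 5 * steps
--     return (
--         video_width + 2 * border_size,
--         height_without_table + new_table_height,
--         video_width,
--         new_table_height,
--     )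
-- ===== Notes on version B (the rewrite author's own statement) =====
-- stated objective: faster
-- what changed: Replaces the decrement-by-5 while loop with a closed-form ceiling division computing the number of 5-pixel shrink steps directly.
import Mathlib
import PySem

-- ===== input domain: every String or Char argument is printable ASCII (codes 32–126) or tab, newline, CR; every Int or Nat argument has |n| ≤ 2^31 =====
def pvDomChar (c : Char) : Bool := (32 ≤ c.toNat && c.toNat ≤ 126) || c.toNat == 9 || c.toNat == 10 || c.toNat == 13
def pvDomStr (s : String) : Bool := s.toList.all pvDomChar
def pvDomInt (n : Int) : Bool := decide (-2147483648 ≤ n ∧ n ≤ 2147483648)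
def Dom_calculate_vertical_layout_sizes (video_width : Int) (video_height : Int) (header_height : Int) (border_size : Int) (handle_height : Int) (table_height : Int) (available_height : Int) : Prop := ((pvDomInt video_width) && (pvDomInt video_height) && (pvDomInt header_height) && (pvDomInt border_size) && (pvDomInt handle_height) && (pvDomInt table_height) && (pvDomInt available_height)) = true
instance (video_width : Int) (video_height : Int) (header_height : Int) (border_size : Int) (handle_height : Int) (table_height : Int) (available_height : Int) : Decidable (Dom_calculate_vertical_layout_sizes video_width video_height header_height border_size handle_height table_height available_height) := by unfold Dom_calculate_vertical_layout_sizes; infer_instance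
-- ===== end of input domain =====

-- ===== PORT A =====
-- B replaces A's decrement-by-5 while loop with a closed-form ceiling division (objective: faster).

-- the while loop of A: shrink nt by 5 until it fits
def pvShrinkTable (height_without_table : Int) (available_height : Int) (nt : Int) : Int :=
  if height_without_table + nt > available_height then
    pvShrinkTable height_without_table available_height (nt - 5)
  else nt
termination_by (height_without_table + nt - available_height).toNat
decreasing_by omega

def calculate_vertical_layout_sizes (video_width : Int) (video_height : Int) (header_height : Int) (border_size : Int) (handle_height : Int) (table_height : Int) (available_height : Int) : List Int :=
  let height_without_table := 2 * border_size + header_height + video_height + handle_height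
  let new_table_height := pvShrinkTable height_without_table available_height table_height
  let window_width := video_width + 2 * border_size
  let window_height := height_without_table + new_table_height
  let table_width := video_width
  [window_width, window_height, table_width, new_table_height]

-- ===== PORT B =====
def calculate_vertical_layout_sizes_alt (video_width : Int) (video_height : Int) (header_height : Int) (border_size : Int) (handle_height : Int) (table_height : Int) (available_height : Int) : List Int :=
  let height_without_table := 2 * border_size + header_height + video_height + handle_height
  let excess := height_without_table + table_height - available_height
  let steps := max 0 (-(PySem.Int.floordiv (-excess) 5))
  let new_table_height := table_height - 5 * steps
  [video_width + 2 * border_size,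
   height_without_table + new_table_height,
   video_width,
   new_table_height]

-- ===== PRECONDITION & SPEC =====
def Spec_calculate_vertical_layout_sizes (video_width : Int) (video_height : Int) (header_height : Int) (border_size : Int) (handle_height : Int) (table_height : Int) (available_height : Int) (out : List Int) : Prop := out = calculate_vertical_layout_sizes_alt video_width video_height header_height border_size handle_height table_height available_height
instance (video_width : Int) (video_height : Int) (header_height : Int) (border_size : Int) (handle_height : Int) (table_height : Int) (available_height : Int) (out : List Int) : Decidable (Spec_calculate_vertical_layout_sizes video_width video_height header_height border_size handle_height table_height available_height out) := by unfold Spec_calculate_vertical_layout_sizes; infer_instance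

-- ===== CLAIM (what is proved, stated in full; the proofs are below) =====
def Claim_equal_calculate_vertical_layout_sizes : Prop := ∀ (video_width : Int) (video_height : Int) (header_height : Int) (border_size : Int) (handle_height : Int) (table_height : Int) (available_height : Int), Dom_calculate_vertical_layout_sizes video_width video_height header_height border_size handle_height table_height available_height → Spec_calculate_vertical_layout_sizes video_width video_height header_height border_size handle_height table_height available_height (calculate_vertical_layout_sizes video_width video_height header_height border_size handle_height table_height available_height)

-- ===== LEMMAS AND PROOFS =====
theorem pvShrinkTable_closed (h a nt : Int) :
    pvShrinkTable h a nt = nt - 5 * max 0 (-((-(h + nt - a)) / 5)) := by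
  fun_induction pvShrinkTable h a nt with
  | case1 hc _ ih => rw [ih]; omega
  | case2 hc _ => omega

-- ===== VERDICT (by name: the statement is the Claim_ definition above) =====
theorem calculate_vertical_layout_sizes_spec : Claim_equal_calculate_vertical_layout_sizes := by
  intro vw vh hh bs hhh th ah _
  simp only [Spec_calculate_vertical_layout_sizes, calculate_vertical_layout_sizes,
    calculate_vertical_layout_sizes_alt, pvShrinkTable_closed,
    PySem.Int.floordiv_eq_ediv_of_pos (show (0:Int) < 5 by norm_num)]
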